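-- pv_equiv track=rewrite | github.com/miliar/Code_Jam_Webscraper | solutions_python/Problem_96/1697.py | process
-- ===== SOURCE A (Python) =====
-- def decompose(N):
-- 	r = N%3
-- 	x = N//3
-- 	if r == 2:
-- 		return (x+1, -1)
-- 	else:
-- 		return (x, r)
--
-- def process(tots, S, p):
-- 	num = 0
-- 	for tot in tots:
-- 		if tot == 0:
-- 			if p == 0:
-- 				num += 1
-- 			continue
-- 		(x, r) = decompose(tot)
-- 		if(x+1 < p):
-- 			continue
-- 		if(x >= p):
-- 			num += 1
-- 			continue
--
-- 		# here x < p and x >= p-1, i.e. x = p-1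
-- 		if (r==1):
-- 			num += 1
-- 		elif S > 0:
-- 			num += 1
-- 			S -= 1
-- 	return num
-- ===== SOURCE B (Python) =====
-- def process(tots, S, p):
--     # A tot with x=(tot+1)//3 counts unconditionally iff tot >= 3*p-2 (covers x>=p and the
--     # x==p-1, r==1 case, which is exactly tot==3*p-2); it is a budget candidate iff
--     # tot is 3*p-4 or 3*p-3. Zero tots are special: they count iff p == 0.
--     zeros = tots.count(0) if p == 0 else 0
--     base = sum(1 for t in tots if t != 0 and t >= 3 * p - 2)
--     eligible = sum(1 for t in tots if t != 0 and 3 * p - 4 <= t <= 3 * p - 3)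
--     return zeros + base + min(max(S, 0), eligible)
-- ===== Notes on version B (the rewrite author's own statement) =====
-- stated objective: alternative
-- what changed: B eliminates decompose and the budget-threaded loop entirely: the per-element modular classification is replaced by plain threshold comparisons on tot itself (counts iff tot >= 3p-2, budget candidate iff tot in {3p-4, 3p-3}), tallied by three independent counting passes and combined as zeros + base + min(max(S,0), eligible).
import Mathlib
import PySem

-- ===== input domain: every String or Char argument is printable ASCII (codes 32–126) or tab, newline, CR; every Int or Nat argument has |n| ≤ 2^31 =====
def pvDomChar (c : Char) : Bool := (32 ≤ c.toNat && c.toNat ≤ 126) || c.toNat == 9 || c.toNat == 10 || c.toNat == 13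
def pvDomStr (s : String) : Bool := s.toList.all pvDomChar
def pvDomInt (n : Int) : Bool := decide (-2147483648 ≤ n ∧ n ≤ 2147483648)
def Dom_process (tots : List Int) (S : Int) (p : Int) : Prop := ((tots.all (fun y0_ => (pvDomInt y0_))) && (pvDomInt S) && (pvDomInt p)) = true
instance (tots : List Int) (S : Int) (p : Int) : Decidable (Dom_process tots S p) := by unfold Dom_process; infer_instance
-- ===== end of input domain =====

-- B replaces the decompose/mod classification and the budget-threaded loop by pure threshold
-- comparisons on tot (count iff tot >= 3p-2; candidate iff tot in {3p-4,3p-3}) tallied by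
-- independent counting passes and combined in closed form (alternative decomposition).


-- ===== PORT A =====
def decompose (N : Int) : Int × Int :=
  let r := PySem.Int.mod N 3
  let x := PySem.Int.floordiv N 3
  if r = 2 then (x + 1, -1) else (x, r)

-- A's loop, threading the state (num, S) exactly as the Python for-loop does
def processLoop (p : Int) : List Int → Int → Int → Int
  | [], num, _ => num
  | tot :: rest, num, S =>
    if tot = 0 then
      if p = 0 then processLoop p rest (num + 1) S else processLoop p rest num S
    else
      let (x, r) := decompose tot
      if x + 1 < p then processLoop p rest num S
      else if x ≥ p then processLoop p rest (num + 1) S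
      else if r = 1 then processLoop p rest (num + 1) S
      else if S > 0 then processLoop p rest (num + 1) (S - 1)
      else processLoop p rest num S

def process (tots : List Int) (S : Int) (p : Int) : Int :=
  processLoop p tots 0 S

-- ===== PORT B =====
-- three independent tallies over the list, then a closed-form combination; no decompose, no mod
def process_alt (tots : List Int) (S : Int) (p : Int) : Int :=
  let zeros : Int := if p = 0 then (tots.count 0 : Int) else 0
  let base : Int := (tots.countP (fun t => decide (t ≠ 0) && decide (3 * p - 2 ≤ t)) : Int)
  let eligible : Int :=
    (tots.countP (fun t => decide (t ≠ 0) && decide (3 * p - 4 ≤ t) && decide (t ≤ 3 * p - 3)) : Int)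
  zeros + base + min (max S 0) eligible

-- ===== PRECONDITION & SPEC =====
def Spec_process (tots : List Int) (S : Int) (p : Int) (out : Int) : Prop := out = process_alt tots S p
instance (tots : List Int) (S : Int) (p : Int) (out : Int) : Decidable (Spec_process tots S p out) := by unfold Spec_process; infer_instance

-- ===== CLAIM (what is proved, stated in full; the proofs are below) =====
def Claim_equal_process : Prop := ∀ (tots : List Int) (S : Int) (p : Int), Dom_process tots S p → Spec_process tots S p (process tots S p)

-- ===== LEMMAS AND PROOFS =====

-- abbreviations for B's three tallies (proof-side only)
def zcnt (p : Int) (ts : List Int) : Int := if p = 0 then (ts.count 0 : Int) else 0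
def bcnt (p : Int) (ts : List Int) : Int :=
  (ts.countP (fun t => decide (t ≠ 0) && decide (3 * p - 2 ≤ t)) : Int)
def ecnt (p : Int) (ts : List Int) : Int :=
  (ts.countP (fun t => decide (t ≠ 0) && decide (3 * p - 4 ≤ t) && decide (t ≤ 3 * p - 3)) : Int)

theorem ecnt_nonneg (p : Int) (ts : List Int) : 0 ≤ ecnt p ts := by
  unfold ecnt; exact_mod_cast Int.natCast_nonneg _

-- decompose t = (x, r) with 3*x + r = t when r∈{0,1}, and 3*x - 1 - ... ; we characterize it
theorem decompose_char (t : Int) :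
    ∃ x r : Int, decompose t = (x, r) ∧ 3 * x + (if r = -1 then -1 else r) = t ∧
      (r = 0 ∨ r = 1 ∨ r = -1) := by
  have h3 : (0:Int) < 3 := by norm_num
  have hm := PySem.Int.mod_eq_emod_of_pos (a := t) h3
  have hd := PySem.Int.floordiv_eq_ediv_of_pos (a := t) h3
  have hlo : 0 ≤ t % 3 := Int.emod_nonneg t (by norm_num)
  have hhi : t % 3 < 3 := Int.emod_lt_of_pos t h3
  have heq : 3 * (t / 3) + t % 3 = t := by omega
  unfold decompose
  rw [hm, hd]
  by_cases h2 : t % 3 = 2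
  · exact ⟨t / 3 + 1, -1, by simp [h2], by omega, by simp⟩
  · exact ⟨t / 3, t % 3, by simp [h2], by omega, by omega⟩

theorem loop_eq (p : Int) (ts : List Int) (num S : Int) :
    processLoop p ts num S = num + zcnt p ts + bcnt p ts + min (max S 0) (ecnt p ts) := by
  induction ts generalizing num S with
  | nil => simp [processLoop, zcnt, bcnt, ecnt]
  | cons t rest ih =>
    have hen := ecnt_nonneg p rest
    have hz : zcnt p (t :: rest) = (if p = 0 ∧ t = 0 then 1 else 0) + zcnt p rest := by
      unfold zcnt
      by_cases hp : p = 0 <;> by_cases ht : t = 0 <;>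
        simp [hp, ht, List.count_cons] <;> push_cast <;> omega
    have hb : bcnt p (t :: rest) =
        (if t ≠ 0 ∧ 3 * p - 2 ≤ t then 1 else 0) + bcnt p rest := by
      unfold bcnt
      rw [List.countP_cons]
      push_cast
      simp only [Bool.and_eq_true, decide_eq_true_eq]
      split_ifs <;> simp_all <;> omega
    have he : ecnt p (t :: rest) =
        (if t ≠ 0 ∧ 3 * p - 4 ≤ t ∧ t ≤ 3 * p - 3 then 1 else 0) + ecnt p rest := by
      unfold ecnt
      rw [List.countP_cons]
      push_cast
      simp only [Bool.and_eq_true, decide_eq_true_eq]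
      split_ifs <;> simp_all <;> omega
    rw [hz, hb, he]
    simp only [processLoop]
    by_cases h0 : t = 0
    · rw [if_pos h0]
      by_cases hp : p = 0
      · rw [if_pos hp, ih]; split_ifs <;> simp_all <;> omega
      · rw [if_neg hp, ih]; split_ifs <;> simp_all <;> omega
    · rw [if_neg h0]
      obtain ⟨x, r, hd, hsum, hr⟩ := decompose_char t
      rw [hd]
      simp only
      have hA : 3 * x - 1 ≤ t ∧ t ≤ 3 * x + 1 := by
        rcases hr with h | h | h <;> subst h <;> norm_num at hsum <;> omega
      have hB : r = 1 → t = 3 * x + 1 := by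
        intro h; subst h; norm_num at hsum; omega
      have hC : r ≠ 1 → t ≤ 3 * x := by
        intro hne; rcases hr with h | h | h <;> subst h <;> norm_num at hsum <;>
          first | omega | exact absurd rfl hne
      by_cases h1 : x + 1 < p
      · rw [if_pos h1, ih]; split_ifs <;> omega
      · rw [if_neg h1]
        by_cases h2 : x ≥ p
        · rw [if_pos h2, ih]; split_ifs <;> omega
        · rw [if_neg h2]
          have hx : x = p - 1 := by omega
          by_cases h3 : r = 1
          · have ht1 := hB h3
            rw [if_pos h3, ih]; split_ifs <;> omega
          · have ht2 := hC h3
            rw [if_neg h3]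
            by_cases hS : S > 0
            · rw [if_pos hS, ih]; split_ifs <;> omega
            · rw [if_neg hS, ih]; split_ifs <;> omega

-- ===== VERDICT (by name: the statement is the Claim_ definition above) =====
theorem process_spec : Claim_equal_process := by
  intro tots S p _
  unfold Spec_process process process_alt
  rw [loop_eq]
  simp only [zcnt, bcnt, ecnt]
  split_ifs <;> omega
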